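-- pv_equiv track=rewrite | github.com/RandomWilder/Covenantrix-DT | backend/infrastructure/external/numbeo_api.py | _find_best_city_match
-- ===== SOURCE A (Python) =====
-- from typing import Dict, Any, Optional, List
--
-- def _find_best_city_match(cities: List[Dict], target_city: str, target_country: str) -> Optional[Dict]:
--     """
--     Find best matching city from API results
--
--     Args:
--         cities: List of cities from API
--         target_city: Target city name
--         target_country: Target country name
--
--     Returns:
--         Best matching city data or None
--     """
--     target_city_lower = target_city.lower()
--     target_country_lower = target_country.lower()
--
--     # Exact match first
--     for city in cities:
--         if (city.get("city", "").lower() == target_city_lower and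
--             city.get("country", "").lower() == target_country_lower):
--             return city
--
--     # Partial match
--     for city in cities:
--         city_name = city.get("city", "").lower()
--         country_name = city.get("country", "").lower()
--
--         if (target_city_lower in city_name or city_name in target_city_lower) and \
--            (target_country_lower in country_name or country_name in target_country_lower):
--             return city
--
--     # Return first city if no match found
--     return cities[0] if cities else None
-- ===== SOURCE B (Python) =====
-- def _find_best_city_match(cities, target_city, target_country):
--     target_city_lower = target_city.lower()
--     target_country_lower = target_country.lower()
--
--     first_partial = None
--     for city in cities:
--         city_name = city.get("city", "").lower()
--         country_name = city.get("country", "").lower()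
--
--         if city_name == target_city_lower and country_name == target_country_lower:
--             return city
--
--         if first_partial is None and \
--            (target_city_lower in city_name or city_name in target_city_lower) and \
--            (target_country_lower in country_name or country_name in target_country_lower):
--             first_partial = city
--
--     if first_partial is not None:
--         return first_partial
--     return cities[0] if cities else None
-- ===== Notes on version B (the rewrite author's own statement) =====
-- stated objective: alternative
-- what changed: Replaced A's two sequential scans (exact pass, then partial pass) by one single pass that returns an exact match immediately and remembers the first partial match in a local variable.
import Mathlib
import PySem

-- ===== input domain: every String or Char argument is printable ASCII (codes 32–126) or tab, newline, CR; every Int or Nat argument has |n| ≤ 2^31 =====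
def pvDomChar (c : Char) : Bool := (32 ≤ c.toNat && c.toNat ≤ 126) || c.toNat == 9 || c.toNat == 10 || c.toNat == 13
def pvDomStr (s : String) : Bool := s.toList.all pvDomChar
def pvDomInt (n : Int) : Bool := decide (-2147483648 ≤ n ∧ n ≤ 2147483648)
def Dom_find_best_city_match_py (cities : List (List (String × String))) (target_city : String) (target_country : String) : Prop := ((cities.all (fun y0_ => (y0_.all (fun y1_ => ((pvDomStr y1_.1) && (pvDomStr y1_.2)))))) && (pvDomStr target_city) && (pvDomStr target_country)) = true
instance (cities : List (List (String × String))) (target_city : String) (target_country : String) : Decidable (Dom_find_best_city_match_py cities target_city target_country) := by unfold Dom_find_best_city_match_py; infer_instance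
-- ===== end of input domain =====

-- B makes one pass returning an exact match at once and remembering the first partial match,
-- instead of A's two sequential passes; return value proven equal on all inputs.

-- ===== PORT A =====
-- city.get(k, "") on the dict (association list)
def pvGetS (city : List (String × String)) (k : String) : String :=
  (PySem.Dict.mk city).getD k ""

-- the exact-match condition of A's first loop
def pvExact (tcl tcol : String) (city : List (String × String)) : Bool :=
  PySem.Str.lower (pvGetS city "city") == tcl && PySem.Str.lower (pvGetS city "country") == tcol

-- the partial-match condition of A's second loop
def pvPartial (tcl tcol : String) (city : List (String × String)) : Bool :=
  let city_name := PySem.Str.lower (pvGetS city "city")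
  let country_name := PySem.Str.lower (pvGetS city "country")
  (PySem.Str.isIn tcl city_name || PySem.Str.isIn city_name tcl) &&
  (PySem.Str.isIn tcol country_name || PySem.Str.isIn country_name tcol)

def find_best_city_match_py (cities : List (List (String × String))) (target_city : String) (target_country : String) : Option (List (String × String)) :=
  let tcl := PySem.Str.lower target_city
  let tcol := PySem.Str.lower target_country
  -- first loop: exact match
  match cities.find? (pvExact tcl tcol) with
  | some city => some city
  | none =>
    -- second loop: partial match
    match cities.find? (pvPartial tcl tcol) with
    | some city => some city
    | none => cities.head?   -- cities[0] if cities else None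

-- ===== PORT B =====
-- B's single loop: return on exact match, remember the first partial in first_partial
def pvAltLoop (tcl tcol : String) :
    List (List (String × String)) → Option (List (String × String)) → Option (List (String × String))
  | [], first_partial => first_partial
  | city :: rest, first_partial =>
    if pvExact tcl tcol city then some city
    else pvAltLoop tcl tcol rest
      (if first_partial.isNone && pvPartial tcl tcol city then some city else first_partial)

def find_best_city_match_py_alt (cities : List (List (String × String))) (target_city : String) (target_country : String) : Option (List (String × String)) :=
  let tcl := PySem.Str.lower target_city
  let tcol := PySem.Str.lower target_country
  match pvAltLoop tcl tcol cities none with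
  | some city => some city
  | none => cities.head?

-- ===== PRECONDITION & SPEC =====
def Spec_find_best_city_match_py (cities : List (List (String × String))) (target_city : String) (target_country : String) (out : Option (List (String × String))) : Prop := out = find_best_city_match_py_alt cities target_city target_country
instance (cities : List (List (String × String))) (target_city : String) (target_country : String) (out : Option (List (String × String))) : Decidable (Spec_find_best_city_match_py cities target_city target_country out) := by unfold Spec_find_best_city_match_py; infer_instance

-- ===== CLAIM (what is proved, stated in full; the proofs are below) =====
def Claim_equal_find_best_city_match_py : Prop := ∀ (cities : List (List (String × String))) (target_city : String) (target_country : String), Dom_find_best_city_match_py cities target_city target_country → Spec_find_best_city_match_py cities target_city target_country (find_best_city_match_py cities target_city target_country)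

-- ===== LEMMAS AND PROOFS =====

-- the loop of B, unrolled: exact find? wins; otherwise the accumulator, else partial find?
theorem pvAltLoop_eq (tcl tcol : String) (cities : List (List (String × String)))
    (fp : Option (List (String × String))) :
    pvAltLoop tcl tcol cities fp =
      match cities.find? (pvExact tcl tcol) with
      | some city => some city
      | none => fp.or (cities.find? (pvPartial tcl tcol)) := by
  induction cities generalizing fp with
  | nil => cases fp <;> simp [pvAltLoop]
  | cons c rest ih =>
    simp only [pvAltLoop, List.find?]
    by_cases he : pvExact tcl tcol c
    · simp [he]
    · simp only [he, Bool.false_eq_true, if_false, ih]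
      cases fp with
      | none => by_cases hp : pvPartial tcl tcol c <;> simp [hp]
      | some v => by_cases hp : pvPartial tcl tcol c <;> simp [hp]

-- ===== VERDICT (by name: the statement is the Claim_ definition above) =====
theorem find_best_city_match_py_spec : Claim_equal_find_best_city_match_py := by
  intro cities tc tco _
  unfold Spec_find_best_city_match_py find_best_city_match_py find_best_city_match_py_alt
  simp only [pvAltLoop_eq]
  cases cities.find? (pvExact (PySem.Str.lower tc) (PySem.Str.lower tco)) <;>
    cases cities.find? (pvPartial (PySem.Str.lower tc) (PySem.Str.lower tco)) <;> simp
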